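-- pv_equiv track=rewrite | github.com/minsung37/Algorithm | etc/programmers/실전대비/3-4.py | solution
-- ===== SOURCE A (Python) =====
-- from collections import defaultdict
--
-- def solution(n, lighthouse):
--     maps = defaultdict(list)
--     result = set()
--     for x, y in lighthouse:
--         maps[x].append(y)
--         maps[y].append(x)
--     for i in range(n):
--         if maps[i + 1]:
--             if len(maps[i + 1]) == 1:
--                 result.add(maps[i + 1][0])
--     return len(result)
-- ===== SOURCE B (Python) =====
-- def solution(n, lighthouse):
--     deg = {}
--     for x, y in lighthouse:
--         deg[x] = deg.get(x, 0) + 1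
--         deg[y] = deg.get(y, 0) + 1
--     result = set()
--     for x, y in lighthouse:
--         if 1 <= x <= n and deg[x] == 1:
--             result.add(y)
--         if 1 <= y <= n and deg[y] == 1:
--             result.add(x)
--     return len(result)
-- ===== Notes on version B (the rewrite author's own statement) =====
-- stated objective: alternative
-- what changed: B keeps only a degree counter (no adjacency lists) and finds the answers by a second scan over the edges instead of iterating the node range 1..n, adding the opposite endpoint of every edge whose in-range endpoint has degree exactly 1.
import Mathlib
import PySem

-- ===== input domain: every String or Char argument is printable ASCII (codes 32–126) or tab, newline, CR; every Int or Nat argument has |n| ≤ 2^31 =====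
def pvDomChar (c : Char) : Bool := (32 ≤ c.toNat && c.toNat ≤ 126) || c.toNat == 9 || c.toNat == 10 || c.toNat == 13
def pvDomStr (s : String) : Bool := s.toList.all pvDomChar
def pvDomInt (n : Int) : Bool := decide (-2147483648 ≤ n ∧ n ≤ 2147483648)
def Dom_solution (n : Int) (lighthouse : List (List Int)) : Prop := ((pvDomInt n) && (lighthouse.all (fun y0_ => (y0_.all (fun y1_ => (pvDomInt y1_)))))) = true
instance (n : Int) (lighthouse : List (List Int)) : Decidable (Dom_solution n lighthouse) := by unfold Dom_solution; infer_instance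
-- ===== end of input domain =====

-- B replaces A's adjacency-list map with a bare degree counter and scans the edge
-- list (instead of the node range 1..n) to collect the neighbours; same answers.

-- ===== PORT A =====
-- maps = defaultdict(list); for x, y in lighthouse: maps[x].append(y); maps[y].append(x)
def solutionMaps (lighthouse : List (List Int)) : PySem.Dict Int (List Int) :=
  lighthouse.foldl (fun m e =>
    match e with
    | [x, y] => (m.modify x [] (· ++ [y])).modify y [] (· ++ [x])
    | _ => m) PySem.Dict.empty   -- non-pair rows raise in Python; excluded by Pre_

def solution (n : Int) (lighthouse : List (List Int)) : Int :=
  let maps := solutionMaps lighthouse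
  let result : PySem.Set Int :=
    (PySem.List.pyRange 0 n 1).foldl (fun r i =>
      let l := maps.getD (i + 1) []
      if l ≠ [] then
        if l.length = 1 then PySem.Set.add r (l.headD 0) else r
      else r) PySem.Set.empty
  (result.length : Int)

-- ===== PORT B =====
-- deg = {}; for x, y in lighthouse: deg[x] = deg.get(x,0)+1; deg[y] = deg.get(y,0)+1
def solutionDeg (lighthouse : List (List Int)) : PySem.Dict Int Int :=
  lighthouse.foldl (fun d e =>
    match e with
    | [x, y] => ((d.insert x (d.getD x 0 + 1)).insert y ((d.insert x (d.getD x 0 + 1)).getD y 0 + 1))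
    | _ => d) PySem.Dict.empty   -- non-pair rows raise in Python; excluded by Pre_

def solution_alt (n : Int) (lighthouse : List (List Int)) : Int :=
  let deg := solutionDeg lighthouse
  let result : PySem.Set Int :=
    lighthouse.foldl (fun r e =>
      match e with
      | [x, y] =>
        let r := if 1 ≤ x ∧ x ≤ n ∧ deg.getD x 0 = 1 then PySem.Set.add r y else r
        if 1 ≤ y ∧ y ≤ n ∧ deg.getD y 0 = 1 then PySem.Set.add r x else r
      | _ => r) PySem.Set.empty
  (result.length : Int)

-- ===== PRECONDITION & SPEC =====
-- Pre_ excludes rows that are not pairs: Python's 'for x, y in lighthouse' raises ValueError there.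
def Pre_solution (n : Int) (lighthouse : List (List Int)) : Prop :=
  ∀ e ∈ lighthouse, e.length = 2
instance (n : Int) (lighthouse : List (List Int)) : Decidable (Pre_solution n lighthouse) := by
  unfold Pre_solution; infer_instance

def pvWitness_solution : Int × List (List Int) := (3, [[1, 2], [2, 3]])

def Spec_solution (n : Int) (lighthouse : List (List Int)) (out : Int) : Prop := out = solution_alt n lighthouse
instance (n : Int) (lighthouse : List (List Int)) (out : Int) : Decidable (Spec_solution n lighthouse out) := by unfold Spec_solution; infer_instance

-- ===== CLAIM (what is proved, stated in full; the proofs are below) =====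
def Claim_equal_solution : Prop := ∀ (n : Int) (lighthouse : List (List Int)), Dom_solution n lighthouse → Pre_solution n lighthouse → Spec_solution n lighthouse (solution n lighthouse)

-- ===== LEMMAS AND PROOFS =====

-- contribution of one edge row to the neighbour list of v
def contrib (v : Int) (e : List Int) : List Int :=
  match e with
  | [x, y] => (if x = v then [y] else []) ++ (if y = v then [x] else [])
  | _ => []

def nbrs (lighthouse : List (List Int)) (v : Int) : List Int :=
  lighthouse.flatMap (contrib v)

theorem nbrs_nil (v : Int) : nbrs [] v = [] := rfl

theorem nbrs_cons (e : List Int) (lh : List (List Int)) (v : Int) :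
    nbrs (e :: lh) v = contrib v e ++ nbrs lh v := by
  simp [nbrs]

theorem maps_getD (lh : List (List Int)) (m : PySem.Dict Int (List Int)) (v : Int) :
    (lh.foldl (fun m e =>
      match e with
      | [x, y] => (m.modify x [] (· ++ [y])).modify y [] (· ++ [x])
      | _ => m) m).getD v [] = m.getD v [] ++ nbrs lh v := by
  induction lh generalizing m with
  | nil => simp [nbrs_nil]
  | cons e lh ih =>
    rcases e with _ | ⟨x, _ | ⟨y, _ | ⟨z, t⟩⟩⟩
    · rw [List.foldl_cons, ih, nbrs_cons]; simp [contrib]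
    · rw [List.foldl_cons, ih, nbrs_cons]; simp [contrib]
    · rw [List.foldl_cons, ih, nbrs_cons]
      simp only [contrib, PySem.Dict.getD_modify]
      clear ih; split_ifs <;> subst_vars <;> simp_all
    · rw [List.foldl_cons, ih, nbrs_cons]; simp [contrib]

theorem deg_getD (lh : List (List Int)) (d : PySem.Dict Int Int) (v : Int) :
    (lh.foldl (fun d e =>
      match e with
      | [x, y] => ((d.insert x (d.getD x 0 + 1)).insert y ((d.insert x (d.getD x 0 + 1)).getD y 0 + 1))
      | _ => d) d).getD v 0 = d.getD v 0 + ((nbrs lh v).length : Int) := by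
  induction lh generalizing d with
  | nil => simp [nbrs_nil]
  | cons e lh ih =>
    rcases e with _ | ⟨x, _ | ⟨y, _ | ⟨z, t⟩⟩⟩
    · rw [List.foldl_cons, ih, nbrs_cons]; simp [contrib]
    · rw [List.foldl_cons, ih, nbrs_cons]; simp [contrib]
    · rw [List.foldl_cons, ih, nbrs_cons]
      simp only [contrib, PySem.Dict.getD_insert]
      clear ih; split_ifs <;> subst_vars <;> simp_all <;> try omega
    · rw [List.foldl_cons, ih, nbrs_cons]; simp [contrib]

theorem mem_contrib (v t : Int) (e : List Int) :
    t ∈ contrib v e ↔ ∃ x y, e = [x, y] ∧ ((x = v ∧ y = t) ∨ (y = v ∧ x = t)) := by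
  rcases e with _ | ⟨x, _ | ⟨y, _ | ⟨z, r⟩⟩⟩ <;> simp [contrib] <;> omega

theorem mem_nbrs (lh : List (List Int)) (v t : Int) :
    t ∈ nbrs lh v ↔ ∃ x y, [x, y] ∈ lh ∧ ((x = v ∧ y = t) ∨ (y = v ∧ x = t)) := by
  simp only [nbrs, List.mem_flatMap, mem_contrib]
  constructor
  · rintro ⟨e, he, x, y, rfl, h⟩; exact ⟨x, y, he, h⟩
  · rintro ⟨x, y, he, h⟩; exact ⟨[x, y], he, x, y, rfl, h⟩

-- generic fold lemmas for A's conditional-add loop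
theorem foldA_mem (l : List Int) (c : Int → Prop) [DecidablePred c] (f : Int → Int)
    (r0 : PySem.Set Int) (t : Int) :
    t ∈ l.foldl (fun r i => if c i then PySem.Set.add r (f i) else r) r0 ↔
      t ∈ r0 ∨ ∃ i ∈ l, c i ∧ f i = t := by
  induction l generalizing r0 with
  | nil => simp
  | cons a l ih =>
    simp only [List.foldl_cons, ih, List.mem_cons]
    split_ifs with h <;> simp [PySem.Set.mem_add, h] <;> tauto

theorem foldA_nodup (l : List Int) (c : Int → Prop) [DecidablePred c] (f : Int → Int)
    (r0 : PySem.Set Int) (h : r0.Nodup) :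
    (l.foldl (fun r i => if c i then PySem.Set.add r (f i) else r) r0).Nodup := by
  induction l generalizing r0 with
  | nil => exact h
  | cons a l ih =>
    simp only [List.foldl_cons]
    split_ifs with hc
    · exact ih _ (PySem.Set.nodup_add _ _ h)
    · exact ih _ h

-- B's loop body as a function of the edge row
def bStep (n : Int) (deg : PySem.Dict Int Int) (r : PySem.Set Int) (e : List Int) : PySem.Set Int :=
  match e with
  | [x, y] =>
    let r := if 1 ≤ x ∧ x ≤ n ∧ deg.getD x 0 = 1 then PySem.Set.add r y else r
    if 1 ≤ y ∧ y ≤ n ∧ deg.getD y 0 = 1 then PySem.Set.add r x else r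
  | _ => r

def bCond (n : Int) (deg : PySem.Dict Int Int) (t : Int) (e : List Int) : Prop :=
  ∃ x y, e = [x, y] ∧
    ((1 ≤ x ∧ x ≤ n ∧ deg.getD x 0 = 1 ∧ t = y) ∨ (1 ≤ y ∧ y ≤ n ∧ deg.getD y 0 = 1 ∧ t = x))

theorem foldB_mem (n : Int) (deg : PySem.Dict Int Int) (lh : List (List Int))
    (r0 : PySem.Set Int) (t : Int) :
    t ∈ lh.foldl (bStep n deg) r0 ↔ t ∈ r0 ∨ ∃ e ∈ lh, bCond n deg t e := by
  induction lh generalizing r0 with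
  | nil => simp
  | cons e lh ih =>
    rw [List.foldl_cons, ih, List.exists_mem_cons_iff]
    rcases e with _ | ⟨x, _ | ⟨y, _ | ⟨z, r⟩⟩⟩
    · simp [bStep, bCond]
    · simp [bStep, bCond]
    · have hb : bCond n deg t [x, y] ↔
          ((1 ≤ x ∧ x ≤ n ∧ deg.getD x 0 = 1 ∧ t = y) ∨
            (1 ≤ y ∧ y ≤ n ∧ deg.getD y 0 = 1 ∧ t = x)) := by
        simp [bCond]
      rw [hb]
      simp only [bStep]
      clear ih
      generalize (∃ e ∈ lh, bCond n deg t e) = E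
      split_ifs with h1 h2 h2 <;> (try simp only [PySem.Set.mem_add]) <;> tauto
    · simp [bStep, bCond]

theorem foldB_nodup (n : Int) (deg : PySem.Dict Int Int) (lh : List (List Int))
    (r0 : PySem.Set Int) (h : r0.Nodup) : (lh.foldl (bStep n deg) r0).Nodup := by
  induction lh generalizing r0 with
  | nil => exact h
  | cons e lh ih =>
    simp only [List.foldl_cons]
    apply ih
    rcases e with _ | ⟨x, _ | ⟨y, _ | ⟨z, r⟩⟩⟩ <;> simp only [bStep] <;>
      (try split_ifs) <;>
      first
        | exact h
        | exact PySem.Set.nodup_add _ _ h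
        | exact PySem.Set.nodup_add _ _ (PySem.Set.nodup_add _ _ h)

-- the two result sets have the same members
theorem key_iff (n : Int) (lh : List (List Int)) (t : Int) :
    (∃ i ∈ PySem.List.pyRange 0 n 1,
        (nbrs lh (i + 1)).length = 1 ∧ (nbrs lh (i + 1)).headD 0 = t) ↔
      ∃ e ∈ lh, bCond n (solutionDeg lh) t e := by
  have hdeg : ∀ v, (solutionDeg lh).getD v 0 = ((nbrs lh v).length : Int) := by
    intro v
    have := deg_getD lh PySem.Dict.empty v
    simpa [solutionDeg] using this
  constructor
  · rintro ⟨i, hi, hlen, hhead⟩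
    rw [PySem.List.mem_pyRange_one] at hi
    set v := i + 1 with hv
    obtain ⟨w, hw⟩ : ∃ w, nbrs lh v = [w] := List.length_eq_one_iff.mp hlen
    have hwt : w = t := by simpa [hw] using hhead
    have hmem : w ∈ nbrs lh v := by simp [hw]
    rw [mem_nbrs] at hmem
    obtain ⟨x, y, hxy, hcase⟩ := hmem
    refine ⟨[x, y], hxy, x, y, rfl, ?_⟩
    rcases hcase with ⟨hxv, hyw⟩ | ⟨hyv, hxw⟩
    · left; refine ⟨by omega, by omega, ?_, by omega⟩
      simp [hdeg, hxv, hlen]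
    · right; refine ⟨by omega, by omega, ?_, by omega⟩
      simp [hdeg, hyv, hlen]
  · rintro ⟨e, he, x, y, rfl, hcase⟩
    rcases hcase with ⟨hx1, hxn, hdx, hyt⟩ | ⟨hy1, hyn, hdy, hxt⟩
    · have hlen : (nbrs lh x).length = 1 := by
        have := hdeg x; rw [hdx] at this; omega
      refine ⟨x - 1, ?_, ?_⟩
      · rw [PySem.List.mem_pyRange_one]; omega
      · obtain ⟨w, hw⟩ : ∃ w, nbrs lh x = [w] := List.length_eq_one_iff.mp hlen
        have hymem : y ∈ nbrs lh x := by
          rw [mem_nbrs]; exact ⟨x, y, he, Or.inl ⟨rfl, rfl⟩⟩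
        constructor
        · simpa [show x - 1 + 1 = x by omega] using hlen
        · simp only [show x - 1 + 1 = x by omega, hw, List.headD_cons]
          simp [hw] at hymem; omega
    · have hlen : (nbrs lh y).length = 1 := by
        have := hdeg y; rw [hdy] at this; omega
      refine ⟨y - 1, ?_, ?_⟩
      · rw [PySem.List.mem_pyRange_one]; omega
      · obtain ⟨w, hw⟩ : ∃ w, nbrs lh y = [w] := List.length_eq_one_iff.mp hlen
        have hxmem : x ∈ nbrs lh y := by
          rw [mem_nbrs]; exact ⟨x, y, he, Or.inr ⟨rfl, rfl⟩⟩
        constructor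
        · simpa [show y - 1 + 1 = y by omega] using hlen
        · simp only [show y - 1 + 1 = y by omega, hw, List.headD_cons]
          simp [hw] at hxmem; omega

-- ===== VERDICT (by name: the statement is the Claim_ definition above) =====
theorem solution_spec : Claim_equal_solution := by
  intro n lh _ _
  unfold Spec_solution solution solution_alt
  simp only
  -- rewrite A's fold body through maps_getD and the guard collapse
  have hmaps : ∀ v, (solutionMaps lh).getD v [] = nbrs lh v := by
    intro v
    have := maps_getD lh PySem.Dict.empty v
    simpa [solutionMaps] using this
  have hAbody : (fun (r : PySem.Set Int) (i : Int) =>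
      let l := (solutionMaps lh).getD (i + 1) []
      if l ≠ [] then
        if l.length = 1 then PySem.Set.add r (l.headD 0) else r
      else r) = (fun (r : PySem.Set Int) (i : Int) =>
      if (nbrs lh (i + 1)).length = 1 then PySem.Set.add r ((nbrs lh (i + 1)).headD 0) else r) := by
    funext r i
    simp only [hmaps]
    rcases h : nbrs lh (i + 1) with _ | ⟨a, _ | ⟨b, s⟩⟩ <;> simp
  have hBbody : (fun (r : PySem.Set Int) (e : List Int) =>
      match e with
      | [x, y] =>
        let r := if 1 ≤ x ∧ x ≤ n ∧ (solutionDeg lh).getD x 0 = 1 then PySem.Set.add r y else r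
        if 1 ≤ y ∧ y ≤ n ∧ (solutionDeg lh).getD y 0 = 1 then PySem.Set.add r x else r
      | _ => r) = bStep n (solutionDeg lh) := by
    funext r e
    rcases e with _ | ⟨x, _ | ⟨y, _ | ⟨z, s⟩⟩⟩ <;> rfl
  rw [hAbody, hBbody]
  have hA := foldA_mem (PySem.List.pyRange 0 n 1)
      (fun i => (nbrs lh (i + 1)).length = 1) (fun i => (nbrs lh (i + 1)).headD 0)
      PySem.Set.empty
  have hB := foldB_mem n (solutionDeg lh) lh PySem.Set.empty
  have hperm : List.Perm ((PySem.List.pyRange 0 n 1).foldl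
      (fun r i => if (nbrs lh (i + 1)).length = 1 then PySem.Set.add r ((nbrs lh (i + 1)).headD 0) else r)
      PySem.Set.empty) (lh.foldl (bStep n (solutionDeg lh)) PySem.Set.empty) := by
    rw [List.perm_ext_iff_of_nodup]
    · intro t
      rw [hA t, hB t]
      simp only [PySem.Set.empty, List.not_mem_nil, false_or]
      exact key_iff n lh t
    · exact foldA_nodup _ _ _ _ (by simp [PySem.Set.empty])
    · exact foldB_nodup _ _ _ _ (by simp [PySem.Set.empty])
  rw [hperm.length_eq]
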